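-- pv_equiv track=rewrite | github.com/daniel-reich/ubiquitous-fiesta | 8xwqLZuTAsLpNSPEn_3.py | award_prizes
-- ===== SOURCE A (Python) =====
-- def award_prizes(names):
--   values = sorted(names.values())[::-1]
--   for i in names:
--     if names[i] == values[0]:
--       names[i] = 'Gold'
--     elif names[i] == values[1]:
--       names[i] = 'Silver'
--     elif names[i] == values[2]:
--       names[i] = 'Bronze'
--     else:
--       names[i] = 'Participation'
--   return names
-- ===== SOURCE B (Python) =====
-- def award_prizes(names):
--   vals = list(names.values())
--   medals = ['Gold', 'Silver', 'Bronze']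
--   for i in names:
--     rank = sum(1 for u in vals if u > names[i])
--     names[i] = medals[rank] if rank < 3 else 'Participation'
--   return names
-- ===== Notes on version B (the rewrite author's own statement) =====
-- stated objective: alternative
-- what changed: A sorts all values descending and relabels each entry by an elif chain against the top three sorted values; B does not sort at all: it computes each entry's rank as the count of strictly greater values and indexes a medal table with that rank (rank 0/1/2 exactly matches A's elif tie semantics, rank>=3 is Participation).
import Mathlib
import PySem

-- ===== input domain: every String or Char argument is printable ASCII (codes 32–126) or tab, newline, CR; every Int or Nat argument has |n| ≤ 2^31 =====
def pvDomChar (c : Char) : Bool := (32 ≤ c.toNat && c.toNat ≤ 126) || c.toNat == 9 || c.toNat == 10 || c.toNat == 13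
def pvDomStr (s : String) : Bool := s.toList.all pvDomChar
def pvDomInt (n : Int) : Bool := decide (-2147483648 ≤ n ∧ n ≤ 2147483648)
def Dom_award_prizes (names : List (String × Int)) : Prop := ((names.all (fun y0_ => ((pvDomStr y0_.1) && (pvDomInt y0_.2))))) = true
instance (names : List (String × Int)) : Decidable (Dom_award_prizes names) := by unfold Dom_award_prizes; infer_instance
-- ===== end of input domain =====

-- B replaces A's sort-then-elif-chain by a sort-free counting scheme: each entry's prize is
-- decided by its rank = number of strictly greater values (alternative algorithm, same result).
-- In Python both A and B mutate the input dict in place; the equivalence proved here is about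
-- the RETURN value.

-- ===== PORT A =====
-- values = sorted(names.values())[::-1]; [::-1] is reverse (PySem.List.slice?_none_none_neg_one).
-- `values[k]` is read lazily by the elif chain; PySem.List.pyGet? is none exactly where Python's
-- values[k] would raise, and `names[i] == values[k]` becomes `some kv.2 = pyGet? values k`
-- (the chain only reaches an out-of-range index when the Python comparison is false too, so no
-- admitted input raises: A is total and no Pre_ is needed).
def award_prizes (names : List (String × Int)) : List (String × String) :=
  let values := (PySem.List.sorted (names.map Prod.snd) (fun x => x) false).reverse
  names.map (fun kv =>
    (kv.1,
      if some kv.2 = PySem.List.pyGet? values 0 then "Gold"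
      else if some kv.2 = PySem.List.pyGet? values 1 then "Silver"
      else if some kv.2 = PySem.List.pyGet? values 2 then "Bronze"
      else "Participation"))

-- ===== PORT B =====
-- vals = list(names.values()); rank = sum(1 for u in vals if u > names[i]) is a countP
-- (PySem.List.sum_map_ite_one_zero: a 0/1-sum IS a count); names[i] = medals[rank] if rank < 3
-- else 'Participation' — medals[rank] via pyGet? (in range whenever the guard rank < 3 holds,
-- so the .getD default is unreachable).
def award_prizes_alt (names : List (String × Int)) : List (String × String) :=
  let vals := names.map Prod.snd
  let medals : List String := ["Gold", "Silver", "Bronze"]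
  names.map (fun kv =>
    let rank : Int := (vals.countP (fun u => decide (kv.2 < u)) : Int)
    (kv.1, if rank < 3 then (PySem.List.pyGet? medals rank).getD "Participation" else "Participation"))

-- ===== PRECONDITION & SPEC =====
def Spec_award_prizes (names : List (String × Int)) (out : List (String × String)) : Prop := out = award_prizes_alt names
instance (names : List (String × Int)) (out : List (String × String)) : Decidable (Spec_award_prizes names out) := by unfold Spec_award_prizes; infer_instance

-- ===== CLAIM (what is proved, stated in full; the proofs are below) =====
def Claim_equal_award_prizes : Prop := ∀ (names : List (String × Int)), Dom_award_prizes names → Spec_award_prizes names (award_prizes names)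

-- ===== LEMMAS AND PROOFS =====

-- In a descending-sorted list containing v, the elements strictly greater than v form a prefix
-- and v sits right after it: s = front ++ v :: rest with |front| = countP (v < ·) s.
lemma desc_split_at_count (v : Int) :
    ∀ s : List Int, s.Pairwise (fun a b => b ≤ a) → v ∈ s →
      ∃ front rest, s = front ++ v :: rest ∧
        front.length = s.countP (fun u => decide (v < u)) ∧ (∀ u ∈ front, v < u) := by
  intro s
  induction s with
  | nil => intro _ h; cases h
  | cons h t ih =>
      intro hp hv
      rcases List.pairwise_cons.mp hp with ⟨hht, hpt⟩
      by_cases hgt : v < h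
      · have hvt : v ∈ t := by
          cases hv with
          | head => omega
          | tail _ h' => exact h'
        obtain ⟨front, rest, hs, hl, hf⟩ := ih hpt hvt
        refine ⟨h :: front, rest, by simp [hs], ?_, ?_⟩
        · simp [hgt, hl]
        · intro u hu
          cases hu with
          | head => exact hgt
          | tail _ hu => exact hf u hu
      · have hhv : h = v := by
          cases hv with
          | head => rfl
          | tail _ h' => have := hht v h'; omega
        refine ⟨[], t, by simp [hhv], ?_, by simp⟩
        have : t.countP (fun u => decide (v < u)) = 0 := by
          apply List.countP_eq_zero.mpr
          intro u hu
          have := hht u hu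
          simp; omega
        simp [hgt, this]

lemma pyget_cons0 {α : Type} (a : α) (l : List α) : PySem.List.pyGet? (a :: l) 0 = some a := by
  simp [PySem.List.pyGet?, PySem.List.pyIdx?]

lemma pyget_cons1 {α : Type} (a b : α) (l : List α) : PySem.List.pyGet? (a :: b :: l) 1 = some b := by
  simp [PySem.List.pyGet?, PySem.List.pyIdx?]

lemma pyget_cons2 {α : Type} (a b c : α) (l : List α) : PySem.List.pyGet? (a :: b :: c :: l) 2 = some c := by
  simp [PySem.List.pyGet?, PySem.List.pyIdx?]
  rw [if_pos (by omega)]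
  rfl

-- A's elif chain against the descending-sorted s equals B's medal-table lookup at
-- rank = countP (v < ·) s, for any v occurring in s.
lemma chain_eq_rank (s : List Int) (v : Int)
    (hp : s.Pairwise (fun a b => b ≤ a)) (hv : v ∈ s) :
    (if some v = PySem.List.pyGet? s 0 then "Gold"
     else if some v = PySem.List.pyGet? s 1 then "Silver"
     else if some v = PySem.List.pyGet? s 2 then "Bronze"
     else "Participation")
    = (let rank : Int := (s.countP (fun u => decide (v < u)) : Int)
       if rank < 3 then (PySem.List.pyGet? ["Gold", "Silver", "Bronze"] rank).getD "Participation"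
       else "Participation") := by
  obtain ⟨front, rest, hs, hl, hf⟩ := desc_split_at_count v s hp hv
  subst hs
  rw [← hl]
  match front, hf with
  | [], _ =>
      simp only [List.nil_append, pyget_cons0]
      norm_num
  | [a], hf =>
      have ha : v < a := hf a (by simp)
      simp only [List.cons_append, List.nil_append, pyget_cons0, pyget_cons1]
      rw [if_neg (by simp; omega)]
      norm_num
  | [a, b], hf =>
      have ha : v < a := hf a (by simp)
      have hb : v < b := hf b (by simp)
      simp only [List.cons_append, List.nil_append, pyget_cons0, pyget_cons1, pyget_cons2]
      rw [if_neg (by simp; omega), if_neg (by simp; omega)]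
      norm_num
      rfl
  | a :: b :: c :: t, hf =>
      have ha : v < a := hf a (by simp)
      have hb : v < b := hf b (by simp)
      have hc : v < c := hf c (by simp)
      simp only [List.cons_append, pyget_cons0, pyget_cons1, pyget_cons2]
      rw [if_neg (by simp; omega), if_neg (by simp; omega), if_neg (by simp; omega),
        if_neg (by simp; omega)]

-- reverse of ascending-sorted is descending-ordered and a permutation of the values
lemma rev_sorted_pairwise (l : List Int) :
    ((PySem.List.sorted l (fun x => x) false).reverse).Pairwise (fun a b => b ≤ a) :=
  (List.pairwise_reverse).2 (PySem.List.sorted_pairwise l (fun x => x))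

lemma rev_sorted_perm (l : List Int) :
    ((PySem.List.sorted l (fun x => x) false).reverse).Perm l :=
  (List.reverse_perm _).trans (PySem.List.sorted_perm l (fun x => x) false)

-- ===== VERDICT (by name: the statement is the Claim_ definition above) =====
theorem award_prizes_spec : Claim_equal_award_prizes := by
  intro names _
  unfold Spec_award_prizes award_prizes award_prizes_alt
  apply List.map_congr_left
  intro kv hkv
  have hperm := rev_sorted_perm (names.map Prod.snd)
  have hv : kv.2 ∈ (PySem.List.sorted (names.map Prod.snd) (fun x => x) false).reverse :=
    hperm.mem_iff.mpr (List.mem_map_of_mem hkv)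
  have := chain_eq_rank _ kv.2 (rev_sorted_pairwise (names.map Prod.snd)) hv
  simp only at this ⊢
  rw [this, hperm.countP_eq]
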